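-- pv_equiv track=rewrite | github.com/DSMInhyeKang/Algorithm-CodingTest | Algorithm/ProgrammersCodingTest/PythonCodingTest.py | solution
-- ===== SOURCE A (Python) =====
-- import heapq as hq
-- import heapq as hq
--
-- def solution(scoville, K):
--     cnt = 0
--     hq.heapify(scoville)
--
--     while len(scoville) > 1:
--         st = hq.heappop(scoville)
--
--         if st < K:
--             cnt += 1
--             nd = hq.heappop(scoville)
--             hq.heappush(scoville, (st+(nd*2)))
--         else:
--             break
--
--     return -1 if scoville[0] < K else cnt
-- ===== SOURCE B (Python) =====
-- def _insert(xs, v):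
--     # insert v into sorted xs, keeping it sorted (first position with xs[i] >= v)
--     i = 0
--     while i < len(xs) and xs[i] < v:
--         i += 1
--     return xs[:i] + [v] + xs[i:]
--
--
-- def solution(scoville, K):
--     xs = sorted(scoville)
--     cnt = 0
--     while len(xs) > 1 and xs[0] < K:
--         mix = xs[0] + 2 * xs[1]
--         xs = _insert(xs[2:], mix)
--         cnt += 1
--     return cnt if xs[0] >= K else -1
-- ===== Notes on version B (the rewrite author's own statement) =====
-- stated objective: alternative
-- what changed: Replaces the binary heap with a single up-front sort plus ordered insertion of each mix back into the sorted list (and B does not mutate its argument, while A heapifies it in place).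
import Mathlib
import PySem

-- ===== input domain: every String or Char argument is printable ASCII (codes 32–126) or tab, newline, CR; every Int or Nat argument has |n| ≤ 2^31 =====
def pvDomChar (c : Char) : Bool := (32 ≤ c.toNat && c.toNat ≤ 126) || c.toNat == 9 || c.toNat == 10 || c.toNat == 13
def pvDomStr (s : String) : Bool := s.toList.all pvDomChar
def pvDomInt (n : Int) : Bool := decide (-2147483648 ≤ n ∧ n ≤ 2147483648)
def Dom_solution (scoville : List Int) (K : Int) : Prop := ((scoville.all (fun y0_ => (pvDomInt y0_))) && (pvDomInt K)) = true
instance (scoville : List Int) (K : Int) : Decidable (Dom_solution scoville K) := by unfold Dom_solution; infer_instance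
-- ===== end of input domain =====

-- B replaces A's heap with one up-front sort plus ordered re-insertion of each mix; equivalence is
-- about the RETURN value only (A heapifies its argument in place, B does not mutate it).

-- ===== PORT A =====
-- heapq is modelled by its observable behaviour on Int values: hq.heappop returns the minimum of the
-- heap and removes one occurrence of it, scoville[0] of a heap is its minimum, hq.heappush adds the
-- element.  For Int elements (equal values indistinguishable) this is exact.
def heapMin (l : List Int) : Int :=
  match l with
  | [] => 0            -- never used on an empty heap (A raises there; excluded by Pre_solution)
  | x :: t => t.foldl min x

theorem heapMin_mem (l : List Int) (h : l ≠ []) : heapMin l ∈ l := by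
  match l with
  | x :: t =>
    have := PySem.List.min?_mem (xs := x :: t) (key := fun y => y) (m := t.foldl min x)
      (by rw [PySem.List.min?_id_cons])
    simpa [heapMin] using this

-- the while-loop of A; cnt is the running counter
def solutionLoop (l : List Int) (K cnt : Int) : Int :=
  if h : 1 < l.length then
    -- st = hq.heappop(scoville)
    if heapMin l < K then
      -- nd = hq.heappop(scoville); hq.heappush(scoville, st + nd*2)
      solutionLoop ((heapMin l + heapMin (l.erase (heapMin l)) * 2)
          :: (l.erase (heapMin l)).erase (heapMin (l.erase (heapMin l)))) K (cnt + 1)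
    else
      -- break, then: return -1 if scoville[0] < K else cnt   (st already removed)
      if heapMin (l.erase (heapMin l)) < K then -1 else cnt
  else
    -- return -1 if scoville[0] < K else cnt
    if heapMin l < K then -1 else cnt
termination_by l.length
decreasing_by
  have h1 : heapMin l ∈ l := heapMin_mem l (by intro hn; simp [hn] at h)
  have e1 : (l.erase (heapMin l)).length = l.length - 1 := List.length_erase_of_mem h1
  have h2 : heapMin (l.erase (heapMin l)) ∈ l.erase (heapMin l) := by
    apply heapMin_mem
    intro hn
    rw [hn] at e1
    simp at e1
    omega
  have e2 := List.length_erase_of_mem h2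
  simp only [List.length_cons]
  omega

def solution (scoville : List Int) (K : Int) : Int :=
  solutionLoop scoville K 0

-- ===== PORT B =====
-- _insert: walk past the elements < v (the python while loop), put v at the first index with xs[i] >= v
def insertSorted (xs : List Int) (v : Int) : List Int :=
  match xs with
  | [] => [v]
  | x :: t => if x < v then x :: insertSorted t v else v :: x :: t

theorem insertSorted_length (xs : List Int) (v : Int) :
    (insertSorted xs v).length = xs.length + 1 := by
  induction xs with
  | nil => rfl
  | cons x t ih => by_cases h : x < v <;> simp [insertSorted, h, ih]

-- the while-loop of B plus the final return
def altLoop (xs : List Int) (K cnt : Int) : Int :=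
  match xs with
  | a :: b :: t =>
    if a < K then altLoop (insertSorted t (a + 2 * b)) K (cnt + 1)
    else cnt                                   -- loop exits with xs[0] >= K
  | [a] => if a < K then -1 else cnt           -- loop exits with len == 1
  | [] => -1                                   -- unreachable: python B raises IndexError (outside Pre_)
termination_by xs.length
decreasing_by simp [insertSorted_length]

def solution_alt (scoville : List Int) (K : Int) : Int :=
  altLoop (PySem.List.sorted scoville (fun x => x) false) K 0

-- ===== PRECONDITION & SPEC =====
-- Pre_ excludes only the empty list, on which A raises IndexError at scoville[0] (B raises there too).
def Pre_solution (scoville : List Int) (K : Int) : Prop := scoville ≠ []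
instance (scoville : List Int) (K : Int) : Decidable (Pre_solution scoville K) := by
  unfold Pre_solution; infer_instance

def pvWitness_solution : List Int × Int := ([1, 2, 3, 9, 10, 12], 7)

def Spec_solution (scoville : List Int) (K : Int) (out : Int) : Prop := out = solution_alt scoville K
instance (scoville : List Int) (K : Int) (out : Int) : Decidable (Spec_solution scoville K out) := by
  unfold Spec_solution; infer_instance

-- ===== CLAIM (what is proved, stated in full; the proofs are below) =====
def Claim_equal_solution : Prop := ∀ (scoville : List Int) (K : Int), Dom_solution scoville K → Pre_solution scoville K → Spec_solution scoville K (solution scoville K)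

-- ===== LEMMAS AND PROOFS =====

theorem heapMin_le (l : List Int) (y : Int) (hy : y ∈ l) : heapMin l ≤ y := by
  match l with
  | x :: t =>
    have := PySem.List.min?_isMin (xs := x :: t) (key := fun y => y) (m := t.foldl min x)
      (by rw [PySem.List.min?_id_cons]) y hy
    simpa [heapMin] using this


theorem heapMin_eq_of_perm (l l' : List Int) (h : l ≠ []) (hp : l.Perm l') :
    heapMin l = heapMin l' := by
  have h' : l' ≠ [] := by
    intro hn; rw [hn] at hp; exact h (List.Perm.eq_nil hp)
  have m1 := heapMin_mem l h
  have m2 := heapMin_mem l' h'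
  exact le_antisymm (heapMin_le l _ (hp.symm.mem_iff.mp m2)) (heapMin_le l' _ (hp.mem_iff.mp m1))

theorem solutionLoop_perm (n : Nat) : ∀ (l l' : List Int) (K cnt : Int),
    l.length = n → l.Perm l' → solutionLoop l K cnt = solutionLoop l' K cnt := by
  induction n using Nat.strong_induction_on with
  | _ n ih =>
    intro l l' K cnt hlen hp
    have hlen' : l'.length = n := by rw [← hp.length_eq, hlen]
    by_cases hl : l = []
    · subst hl
      rw [hp.symm.eq_nil]
    have hl' : l' ≠ [] := by
      intro hn; rw [hn] at hp; exact hl hp.eq_nil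
    have hm : heapMin l' = heapMin l := (heapMin_eq_of_perm l l' hl hp).symm
    conv_lhs => rw [solutionLoop]
    conv_rhs => rw [solutionLoop]
    rw [hm]
    by_cases hgt : 1 < l.length
    · have hperase : (l.erase (heapMin l)).Perm (l'.erase (heapMin l)) := hp.erase _
      have e1 : (l.erase (heapMin l)).length = l.length - 1 :=
        List.length_erase_of_mem (heapMin_mem l hl)
      have hene : l.erase (heapMin l) ≠ [] := by
        intro hn; rw [hn] at e1; simp at e1; omega
      have hm2 : heapMin (l'.erase (heapMin l)) = heapMin (l.erase (heapMin l)) :=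
        (heapMin_eq_of_perm _ _ hene hperase).symm
      rw [dif_pos hgt, dif_pos (by omega : 1 < l'.length), hm2]
      by_cases hst : heapMin l < K
      · rw [if_pos hst, if_pos hst]
        have e2 := List.length_erase_of_mem (heapMin_mem _ hene)
        exact ih (l.length - 1) (by omega) _ _ K (cnt + 1)
          (by simp only [List.length_cons]; omega)
          ((hperase.erase _).cons _)
      · rw [if_neg hst, if_neg hst]
    · rw [dif_neg hgt, dif_neg (by omega : ¬ 1 < l'.length)]

theorem foldl_min_of_le (t : List Int) (x : Int) (h : ∀ y ∈ t, x ≤ y) : t.foldl min x = x := by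
  induction t generalizing x with
  | nil => rfl
  | cons y t ih =>
    have hxy : min x y = x := min_eq_left (h y (by simp))
    simp only [List.foldl_cons, hxy]
    exact ih x (fun z hz => h z (by simp [hz]))

theorem heapMin_cons_cons (a b : Int) (t : List Int)
    (hab : a ≤ b) (hat : ∀ y ∈ t, a ≤ y) : heapMin (a :: b :: t) = a := by
  simp only [heapMin, List.foldl_cons]
  rw [min_eq_left hab]
  exact foldl_min_of_le t a hat

theorem insertSorted_perm (xs : List Int) (v : Int) : (insertSorted xs v).Perm (v :: xs) := by
  induction xs with
  | nil => simp [insertSorted]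
  | cons x t ih =>
    by_cases h : x < v
    · simp only [insertSorted, h, if_pos]
      exact (ih.cons x).trans (List.Perm.swap v x t)
    · simp [insertSorted, h]

theorem insertSorted_pairwise (xs : List Int) (v : Int) (h : xs.Pairwise (· ≤ ·)) :
    (insertSorted xs v).Pairwise (· ≤ ·) := by
  induction xs with
  | nil => simp [insertSorted]
  | cons x t ih =>
    rcases List.pairwise_cons.mp h with ⟨hx, ht⟩
    have hstep : insertSorted (x :: t) v =
        if x < v then x :: insertSorted t v else v :: x :: t := rfl
    rw [hstep]
    split_ifs with hxv
    · refine List.pairwise_cons.mpr ⟨?_, ih ht⟩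
      intro y hy
      rcases List.mem_cons.mp ((insertSorted_perm t v).mem_iff.mp hy) with rfl | hy
      · omega
      · exact hx y hy
    · refine List.pairwise_cons.mpr ⟨?_, h⟩
      intro y hy
      rcases List.mem_cons.mp hy with rfl | hy
      · omega
      · have := hx y hy; omega

theorem loop_eq_alt (n : Nat) : ∀ (xs : List Int) (K cnt : Int),
    xs.length = n → xs ≠ [] → xs.Pairwise (· ≤ ·) →
    solutionLoop xs K cnt = altLoop xs K cnt := by
  induction n using Nat.strong_induction_on with
  | _ n ih =>
    intro xs K cnt hlen hne hsort
    match xs with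
    | [] => exact absurd rfl hne
    | [a] =>
      rw [solutionLoop]
      simp [altLoop, heapMin]
    | a :: b :: t =>
      rcases List.pairwise_cons.mp hsort with ⟨ha, hbt⟩
      rcases List.pairwise_cons.mp hbt with ⟨hb, ht⟩
      have hab : a ≤ b := ha b (by simp)
      have hat : ∀ y ∈ t, a ≤ y := fun y hy => ha y (by simp [hy])
      have hmin : heapMin (a :: b :: t) = a := heapMin_cons_cons a b t hab hat
      have herase : (a :: b :: t).erase a = b :: t := by simp
      have hmin2 : heapMin (b :: t) = b := by
        match t with
        | [] => rfl
        | c :: t' =>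
          exact heapMin_cons_cons b c t' (hb c (by simp)) (fun y hy => hb y (by simp [hy]))
      have herase2 : (b :: t).erase b = t := by simp
      rw [solutionLoop]
      by_cases hK : a < K
      · rw [dif_pos (by simp), hmin, if_pos hK, herase, hmin2, herase2]
        rw [solutionLoop_perm (t.length + 1) ((a + b * 2) :: t) (insertSorted t (a + 2 * b)) K (cnt + 1)
          (by simp) (by
            have hv : a + b * 2 = a + 2 * b := by ring
            rw [hv]
            exact (insertSorted_perm t (a + 2 * b)).symm)]
        rw [show altLoop (a :: b :: t) K cnt = altLoop (insertSorted t (a + 2 * b)) K (cnt + 1) from by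
          rw [altLoop]; simp [hK]]
        exact ih (t.length + 1) (by simp at hlen; omega) _ K (cnt + 1)
          (by simp [insertSorted_length])
          (by
            intro hn
            have := insertSorted_length t (a + 2 * b)
            rw [hn] at this; simp at this)
          (insertSorted_pairwise t (a + 2 * b) ht)
      · have hbK : ¬ b < K := by omega
        rw [dif_pos (by simp), hmin, if_neg hK, herase, hmin2, if_neg hbK]
        rw [altLoop]
        simp [hK]

-- ===== VERDICT (by name: the statement is the Claim_ definition above) =====
theorem solution_spec : Claim_equal_solution := by
  intro scoville K _ hpre
  unfold Spec_solution solution solution_alt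
  have hperm := PySem.List.sorted_perm (xs := scoville) (key := fun x => x) (rev := false)
  have hne : PySem.List.sorted scoville (fun x => x) false ≠ [] := by
    intro hn
    have h2 := hperm
    rw [hn] at h2
    exact hpre h2.symm.eq_nil
  have hsort : (PySem.List.sorted scoville (fun x => x) false).Pairwise (· ≤ ·) := by
    have := PySem.List.sorted_pairwise (xs := scoville) (key := fun x => x)
    simpa using this
  rw [solutionLoop_perm scoville.length scoville (PySem.List.sorted scoville (fun x => x) false)
    K 0 rfl hperm.symm]
  exact loop_eq_alt (PySem.List.sorted scoville (fun x => x) false).length _ K 0 rfl hne hsort
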